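-- pv_equiv track=rewrite | github.com/Tim-Liam-Hill/Acid | Utils/Base4Convert.py | subOne
-- ===== SOURCE A (Python) =====
-- def subOne(s): #who needs comments???
--     #but seriously, takes a base 4 number in number form (no letters, just numbers)
--     #Then subs 1
--     #If overflow then RIP I guess.
--
--     r = 1
--     ans = ""
--     s = s[::-1]
--     for i in s:
--         if(r != 1):
--             ans = i + ans
--         else:
--             if(i == "0"):
--                 ans = "3" + ans
--             else:
--                 r = 0
--                 ans = str(int(i) - 1) + ans
--
--     return ans
-- ===== SOURCE B (Python) =====
-- def subOne(s):
--     # find-index-then-construct instead of a stateful borrow loop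
--     stripped = s.rstrip('0')
--     if not stripped:
--         return '3' * len(s)
--     idx = len(stripped) - 1
--     return stripped[:idx] + str(int(stripped[idx]) - 1) + '3' * (len(s) - idx - 1)
-- ===== Notes on version B (the rewrite author's own statement) =====
-- stated objective: simpler
-- what changed: Replaces the stateful borrow loop over the reversed string with a find-rightmost-nonzero (rstrip) then direct construction: prefix unchanged, that digit decremented, trailing zeros replaced by '3's.
import Mathlib
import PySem

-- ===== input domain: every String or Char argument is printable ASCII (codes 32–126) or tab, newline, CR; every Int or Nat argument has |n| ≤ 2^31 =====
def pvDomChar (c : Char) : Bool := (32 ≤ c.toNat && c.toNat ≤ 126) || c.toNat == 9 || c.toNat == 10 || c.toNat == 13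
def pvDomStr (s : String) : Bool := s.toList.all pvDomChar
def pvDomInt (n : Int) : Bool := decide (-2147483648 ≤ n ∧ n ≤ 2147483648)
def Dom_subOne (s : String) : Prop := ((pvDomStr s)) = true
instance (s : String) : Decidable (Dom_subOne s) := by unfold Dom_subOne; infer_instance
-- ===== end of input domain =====

-- B replaces A's stateful borrow loop with rstrip-then-construct; equivalence is about the return value.

-- ===== PORT A =====
-- the loop body of A: state = (r, ans) as (Int, List Char); int(i) ported via PySem.Int.ofChars?
-- (total via getD 0; Pre_ excludes exactly the inputs where Python's int(i) raises ValueError)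
def subOneStep (st : Int × List Char) (i : Char) : Int × List Char :=
  if st.1 ≠ 1 then (st.1, i :: st.2)
  else if i = '0' then (st.1, '3' :: st.2)
  else (0, PySem.Int.toChars ((PySem.Int.ofChars? [i]).getD 0 - 1) ++ st.2)

def subOne (s : String) : String :=
  -- s = s[::-1] (step -1 slice = reverse); then the for-loop accumulating (r, ans)
  let rev := s.toList.reverse
  String.mk (rev.foldl subOneStep (1, [])).2

-- ===== PORT B =====
def subOne_alt (s : String) : String :=
  let cs := s.toList
  -- stripped = s.rstrip('0'), ported by hand: drop the '0'-run at the right end (exact)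
  let stripped := (cs.reverse.dropWhile (· == '0')).reverse
  if stripped.isEmpty then String.mk (List.replicate cs.length '3')
  else
    let idx := stripped.length - 1
    String.mk (stripped.take idx ++
      PySem.Int.toChars ((PySem.Int.ofChars? [stripped.getLast!]).getD 0 - 1) ++
      List.replicate (cs.length - idx - 1) '3')

-- ===== PRECONDITION & SPEC =====
-- Pre_ excludes exactly the inputs where Python A raises ValueError: the rightmost
-- non-'0' character (if any) must be a decimal digit, else int(i) raises (B raises there too).
-- the rightmost non-'0' character of s (none if s is empty or all zeros)
def rightmostNonZero? (s : String) : Option Char :=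
  s.toList.foldl (fun acc c => if c = '0' then acc else some c) none

def Pre_subOne (s : String) : Prop := (rightmostNonZero? s).all Char.isDigit = true
instance (s : String) : Decidable (Pre_subOne s) := by unfold Pre_subOne; infer_instance
def pvWitness_subOne : String := ""

def Spec_subOne (s : String) (out : String) : Prop := out = subOne_alt s
instance (s : String) (out : String) : Decidable (Spec_subOne s out) := by unfold Spec_subOne; infer_instance

-- ===== CLAIM (what is proved, stated in full; the proofs are below) =====
def Claim_equal_subOne : Prop := ∀ (s : String), Dom_subOne s → Pre_subOne s → Spec_subOne s (subOne s)

-- ===== LEMMAS AND PROOFS =====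

-- once r = 0, the loop just copies the remaining characters (prepending reverses them back)
theorem foldl_step_copy (l : List Char) (ans : List Char) :
    l.foldl subOneStep (0, ans) = (0, l.reverse ++ ans) := by
  induction l generalizing ans with
  | nil => simp
  | cons i l ih =>
      simp [List.foldl_cons, subOneStep, ih]

-- while r = 1, each '0' becomes '3'
theorem foldl_step_zeros (k : Nat) (ans : List Char) :
    (List.replicate k '0').foldl subOneStep (1, ans) = (1, List.replicate k '3' ++ ans) := by
  induction k generalizing ans with
  | zero => simp
  | succ k ih =>
      rw [List.replicate_succ, List.foldl_cons]
      have h0 : subOneStep (1, ans) '0' = (1, '3' :: ans) := by simp [subOneStep]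
      rw [h0, ih]
      simp [List.replicate_succ', List.append_assoc]

theorem takeWhile_zero_eq_replicate (l : List Char) :
    l.takeWhile (· == '0') = List.replicate (l.takeWhile (· == '0')).length '0' := by
  apply List.eq_replicate_of_mem
  intro c hc
  have := List.mem_takeWhile_imp hc
  simpa using this

theorem subOne_eq_alt (s : String) : subOne s = subOne_alt s := by
  simp only [subOne, subOne_alt]
  generalize s.toList = cs
  have hsplit := (List.takeWhile_append_dropWhile (p := (· == '0')) (l := cs.reverse)).symm
  have hzrep := takeWhile_zero_eq_replicate cs.reverse
  cases ht : cs.reverse.dropWhile (· == '0') with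
  | nil =>
      -- all characters are '0' (or the string is empty)
      rw [ht, List.append_nil] at hsplit
      have hcr : cs.reverse = List.replicate (cs.reverse.takeWhile (· == '0')).length '0' :=
        hsplit.trans hzrep
      have hlen : cs.length = (cs.reverse.takeWhile (· == '0')).length := by
        have := congrArg List.length hcr; simpa using this
      simp only [List.reverse_nil, List.isEmpty_nil, if_true]
      rw [hcr, foldl_step_zeros, hlen]
      simp
  | cons d rest =>
      have hd' : ¬ d = '0' := by
        have h := List.head?_dropWhile_not (p := (· == '0')) (l := cs.reverse)
        rw [ht] at h
        simpa using h
      rw [ht] at hsplit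
      have hA : cs.reverse.foldl subOneStep (1, []) =
          (0, rest.reverse ++
            (PySem.Int.toChars ((PySem.Int.ofChars? [d]).getD 0 - 1) ++
              List.replicate (cs.reverse.takeWhile (· == '0')).length '3')) := by
        conv_lhs => rw [hsplit]
        rw [List.foldl_append]
        conv_lhs => rw [hzrep]
        rw [foldl_step_zeros, List.foldl_cons]
        have hstep : subOneStep (1, List.replicate (cs.reverse.takeWhile (· == '0')).length '3' ++ []) d =
            (0, PySem.Int.toChars ((PySem.Int.ofChars? [d]).getD 0 - 1) ++
              (List.replicate (cs.reverse.takeWhile (· == '0')).length '3' ++ [])) := by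
          simp [subOneStep, hd']
        rw [hstep, foldl_step_copy]
        simp
      have hlen : cs.length = (cs.reverse.takeWhile (· == '0')).length + (rest.length + 1) := by
        have := congrArg List.length hsplit
        simp at this
        omega
      rw [hA]
      simp only [List.reverse_cons]
      rw [if_neg (by simp)]
      have hTake : (rest.reverse ++ [d]).take ((rest.reverse ++ [d]).length - 1)
          = rest.reverse := by
        have h1 : (rest.reverse ++ [d]).length - 1 = rest.reverse.length := by simp
        rw [h1, List.take_left]
      have hLast : (rest.reverse ++ [d]).getLast! = d :=
        List.getLast!_of_getLast? (by simp [List.getLast?_append])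
      have hrep : cs.length - ((rest.reverse ++ [d]).length - 1) - 1
          = (cs.reverse.takeWhile (· == '0')).length := by
        simp only [hlen, List.length_append, List.length_reverse, List.length_cons,
          List.length_nil]
        omega
      rw [hTake, hLast, hrep]
      simp

-- ===== VERDICT (by name: the statement is the Claim_ definition above) =====
theorem subOne_spec : Claim_equal_subOne := by
  intro s _ _
  unfold Spec_subOne
  exact subOne_eq_alt s
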